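-- pv_equiv track=rewrite | github.com/oo13/PyPoDict | podict/parse.py | _parse_flag_comment
-- ===== SOURCE A (Python) =====
-- import string
--
-- def _parse_range_flag_parameter(param):
--     '''Is 'param' the parameter of the 'range' flag?'''
--     idx = 0
--     while idx < len(param) and param[idx] in string.digits:
--         idx += 1
--     if idx > 0 and param[idx:idx+2] == '..':
--         idx += 2
--         m_idx = idx
--         good = False
--         while idx < len(param) and param[idx] in string.digits:
--             good = True
--             idx += 1
--         if good:
--             return param # GNU gettext discards trailing characters, but this library keeps the information.
--         else:
--             return False
--     return False
--
-- def _parse_flag_comment(flag_comment):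
--     '''parse flag comment
--
--     return [flags, ...]
--
--     The flags are separated by some white spaces and commas, but 'range: n..m' flag may contain some separators.
--     '''
--     flags = []
--     flag = ''
--     for i in range(len(flag_comment)):
--         c = flag_comment[i]
--         is_separator = c in string.whitespace or c == ','
--         if not is_separator:
--             flag += c
--         if is_separator or i == len(flag_comment) - 1:
--             if len(flag) > 0:
--                 if len(flags) > 0 and flags[-1] == 'range:' and (param := _parse_range_flag_parameter(flag)):
--                     flags[-1] += ' ' + param
--                 else:
--                     flags.append(flag)
--                 flag = ''
--     return flags
-- ===== SOURCE B (Python) =====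
-- import string
--
--
-- def _parse_range_flag_parameter(param):
--     '''Is 'param' the parameter of the 'range' flag?'''
--     n, sep, rest = param.partition('..')
--     if sep and n.isdigit() and rest[:1].isdigit():
--         return param
--     return False
--
--
-- def _parse_flag_comment(flag_comment):
--     '''parse flag comment
--
--     return [flags, ...]
--
--     The flags are separated by some white spaces and commas, but 'range: n..m' flag may contain some separators.
--     '''
--     flags = []
--     for tok in flag_comment.replace(',', ' ').split():
--         if flags and flags[-1] == 'range:' and _parse_range_flag_parameter(tok):
--             flags[-1] += ' ' + tok
--         else:
--             flags.append(tok)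
--     return flags
-- ===== Notes on version B (the rewrite author's own statement) =====
-- stated objective: faster
-- what changed: A's single character-at-a-time loop that interleaves tokenization with the range-merge is replaced by a two-pass pipeline: map commas to spaces and whitespace-split to get the tokens, then fold a merge step over the token list; the hand-written digit-run scanner in the range-parameter helper becomes a partition on the dot-dot separator.
import Mathlib
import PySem

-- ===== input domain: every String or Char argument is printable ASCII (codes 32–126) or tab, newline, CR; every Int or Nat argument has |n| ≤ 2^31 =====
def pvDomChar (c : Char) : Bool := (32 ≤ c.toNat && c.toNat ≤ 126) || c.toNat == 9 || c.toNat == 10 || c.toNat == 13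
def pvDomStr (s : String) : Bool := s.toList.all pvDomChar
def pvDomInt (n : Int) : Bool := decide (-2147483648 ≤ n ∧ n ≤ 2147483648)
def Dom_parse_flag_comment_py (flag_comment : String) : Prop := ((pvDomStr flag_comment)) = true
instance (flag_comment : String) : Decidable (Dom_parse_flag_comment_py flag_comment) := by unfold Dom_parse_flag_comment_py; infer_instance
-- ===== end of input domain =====

-- B replaces A's single interleaved character loop by tokenize (replace commas, whitespace-split) then a merge fold; measurably faster (C-level split vs per-character Python loop).

-- ===== PORT A =====

-- while idx < len(param) and param[idx] in string.digits: idx += 1   (string.digits membership = '0' ≤ c ≤ '9' = PySem.Chars.isdigit)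
def pvRunA (cs : List Char) (idx : Nat) : Nat :=
  if h : idx < cs.length then
    if PySem.Chars.isdigit cs[idx] then pvRunA cs (idx + 1) else idx
  else idx
termination_by cs.length - idx

-- while idx < len(param) and param[idx] in string.digits: good = True; idx += 1   (returns final 'good')
def pvGoodA (cs : List Char) (idx : Nat) (good : Bool) : Bool :=
  if h : idx < cs.length then
    if PySem.Chars.isdigit cs[idx] then pvGoodA cs (idx + 1) true else good
  else good
termination_by cs.length - idx

-- _parse_range_flag_parameter: some param = returns param (truthy), none = returns False
def pvParseRangeA (param : String) : Option String :=
  let cs := param.toList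
  let idx := pvRunA cs 0
  if 0 < idx ∧ PySem.List.slice cs (some (idx : Int)) (some ((idx : Int) + 2)) = ['.', '.'] then
    if pvGoodA cs (idx + 2) false then some param else none
  else none

-- c in string.whitespace or c == ','
def pvSepA (c : Char) : Bool := " \t\n\r\x0b\x0c".toList.contains c || c == ','

-- the inner flush: merge into flags[-1] if it is 'range:' and the parameter parses (and is truthy), else append
def pvStepA (flags : List String) (flagS : String) : List String :=
  if flags.length > 0 && (PySem.List.pyGet? flags (-1) == some "range:") then
    match pvParseRangeA flagS with
    | some param =>
        if param != "" then
          flags.dropLast ++ [((PySem.List.pyGet? flags (-1)).getD "") ++ " " ++ param]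
        else flags ++ [flagS]
    | none => flags ++ [flagS]
  else flags ++ [flagS]

-- for i in range(len(flag_comment)): … ; 'i == len(flag_comment) - 1' becomes 'rest is empty'
def pvLoopA : List String → List Char → List Char → List String
  | flags, _, [] => flags
  | flags, flag, c :: rest =>
    let is_sep := pvSepA c
    let flag1 := if !is_sep then flag ++ [c] else flag
    if is_sep || rest.isEmpty then
      if flag1.length > 0 then pvLoopA (pvStepA flags (String.ofList flag1)) [] rest
      else pvLoopA flags flag1 rest
    else pvLoopA flags flag1 rest

def parse_flag_comment_py (flag_comment : String) : List String :=
  pvLoopA [] [] flag_comment.toList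

-- ===== PORT B =====

-- param.partition('..'): (part before first '..', some (part after)) ; (param, none) means '..' absent
def pvPartDots : List Char → List Char × Option (List Char)
  | [] => ([], none)
  | c :: cs =>
    if c = '.' ∧ cs.head? = some '.' then ([], some cs.tail)
    else
      let p := pvPartDots cs
      (c :: p.1, p.2)

-- n, sep, rest = param.partition('..'); if sep and n.isdigit() and rest[:1].isdigit(): return param
def pvParseRangeB (param : String) : Option String :=
  let p := pvPartDots param.toList
  match p.2 with
  | some rest =>
      if PySem.Chars.strIsdigit p.1 && PySem.Chars.strIsdigit (rest.take 1) then some param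
      else none
  | none => none

-- if flags and flags[-1] == 'range:' and _parse_range_flag_parameter(tok): flags[-1] += ' ' + tok else append
def pvStepB (flags : List String) (tok : String) : List String :=
  if flags.length > 0 && (PySem.List.pyGet? flags (-1) == some "range:")
      && (match pvParseRangeB tok with | some p => p != "" | none => false) then
    flags.dropLast ++ [((PySem.List.pyGet? flags (-1)).getD "") ++ " " ++ tok]
  else flags ++ [tok]

def parse_flag_comment_py_alt (flag_comment : String) : List String :=
  (PySem.Str.split₀ (PySem.Str.replace flag_comment "," " ")).foldl pvStepB []

-- ===== PRECONDITION & SPEC =====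
def Spec_parse_flag_comment_py (flag_comment : String) (out : List String) : Prop := out = parse_flag_comment_py_alt flag_comment
instance (flag_comment : String) (out : List String) : Decidable (Spec_parse_flag_comment_py flag_comment out) := by unfold Spec_parse_flag_comment_py; infer_instance

-- ===== CLAIM (what is proved, stated in full; the proofs are below) =====
def Claim_equal_parse_flag_comment_py : Prop := ∀ (flag_comment : String), Dom_parse_flag_comment_py flag_comment → Spec_parse_flag_comment_py flag_comment (parse_flag_comment_py flag_comment)


-- ===== LEMMAS AND PROOFS =====
def pvRep (c : Char) : Char := if c = ',' then ' ' else c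

def pvTokA : List Char → List Char → List (List Char)
  | [], flag => if flag.isEmpty then [] else [flag]
  | c :: rest, flag =>
    if pvSepA c then (if flag.isEmpty then pvTokA rest [] else flag :: pvTokA rest [])
    else pvTokA rest (flag ++ [c])

def pvTokS : List Char → List Char → List (List Char)
  | [], cur => if cur.isEmpty then [] else [cur.reverse]
  | c :: rest, cur =>
    if PySem.Chars.isspace c then (if cur.isEmpty then pvTokS rest [] else cur.reverse :: pvTokS rest [])
    else pvTokS rest (c :: cur)

-- ---------- helper-function specs ----------
theorem char_eq_iff_toNat (c d : Char) : c = d ↔ c.toNat = d.toNat :=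
  ⟨fun h => h ▸ rfl, fun h => Char.ext (UInt32.toNat_inj.mp h)⟩

theorem sep_rep (c : Char) (h : pvDomChar c = true) :
    PySem.Chars.isspace (pvRep c) = pvSepA c := by
  by_cases hc : c = ','
  · subst hc; decide
  · have hrep : pvRep c = c := by simp [pvRep, hc]
    rw [hrep]
    have hlist : (" \t\n\r\x0b\x0c".toList) = [' ', '\t', '\n', '\r', '\x0b', '\x0c'] := by decide
    have hnat : c.toNat ≠ 44 := fun hn => hc ((char_eq_iff_toNat c ',').mpr hn)
    rw [Bool.eq_iff_iff]
    simp only [pvSepA, hlist, List.contains_cons, List.contains_nil, PySem.Chars.isspace,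
      beq_iff_eq, char_eq_iff_toNat, pvDomChar, Bool.or_eq_true, Bool.and_eq_true,
      decide_eq_true_eq] at *
    have e1 : (' ').toNat = 32 := rfl
    have e2 : ('\t').toNat = 9 := rfl
    have e3 : ('\n').toNat = 10 := rfl
    have e4 : ('\x0d').toNat = 13 := rfl
    have e5 : ('\x0b').toNat = 11 := rfl
    have e6 : ('\x0c').toNat = 12 := rfl
    have e7 : (',').toNat = 44 := rfl
    rw [e1, e2, e3, e4, e5, e6, e7]
    simp only [Bool.false_eq_true, or_false]
    omega

theorem pvLoopA_eq : ∀ (l : List Char) (flags : List String) (flag : List Char),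
    (l = [] → flag = []) →
    pvLoopA flags flag l = (pvTokA l flag).foldl (fun fs t => pvStepA fs (String.ofList t)) flags := by
  intro l
  induction l with
  | nil => intro flags flag h; simp [pvLoopA, pvTokA, h rfl]
  | cons c rest ih =>
    intro flags flag _
    by_cases hsep : pvSepA c = true
    · by_cases hflag : flag.isEmpty
      · have hf : flag = [] := by simpa [List.isEmpty_iff] using hflag
        subst hf
        simp only [pvLoopA, pvTokA, hsep, hflag]
        simpa using ih flags [] (fun _ => rfl)
      · have hlen : flag.length > 0 := by
          cases flag with
          | nil => simp at hflag
          | cons a t => simp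
        simp only [pvLoopA, pvTokA, hsep, hflag]
        simp only [Bool.not_true, Bool.true_or]
        simpa [hlen] using ih (pvStepA flags (String.ofList flag)) [] (fun _ => rfl)
    · have hsep' : pvSepA c = false := by simpa using hsep
      cases rest with
      | nil =>
        simp [pvLoopA, pvTokA, hsep']
      | cons d rest' =>
        have h := ih flags (flag ++ [c]) (by simp)
        simp only [pvLoopA, pvTokA, hsep'] at h ⊢
        exact h

theorem split₀_go_tokS : ∀ (l : List Char) (cur : List Char) (acc : List (List Char)),
    PySem.Chars.split₀.go l cur acc = acc.reverse ++ pvTokS l cur := by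
  intro l
  induction l with
  | nil =>
    intro cur acc
    by_cases h : cur.isEmpty <;> simp [PySem.Chars.split₀.go, pvTokS, h]
  | cons c rest ih =>
    intro cur acc
    by_cases hs : PySem.Chars.isspace c
    · by_cases h : cur.isEmpty <;>
        simp [PySem.Chars.split₀.go, pvTokS, hs, h, ih]
    · simp [PySem.Chars.split₀.go, pvTokS, hs, ih]

theorem split₀_tokS (l : List Char) : PySem.Chars.split₀ l = pvTokS l [] := by
  simpa using split₀_go_tokS l [] []

theorem replace_go_single (o n : Char) : ∀ (l : List Char) (fuel : Nat) (acc : List Char),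
    l.length ≤ fuel →
    PySem.Chars.replace.go [o] [n] fuel l acc
      = acc.reverse ++ l.map (fun c => if c = o then n else c) := by
  intro l
  induction l with
  | nil =>
    intro fuel acc _
    cases fuel <;> simp [PySem.Chars.replace.go]
  | cons c t ih =>
    intro fuel acc hle
    cases fuel with
    | zero => simp at hle
    | succ f =>
      by_cases hc : c = o
      · subst hc
        simp [PySem.Chars.replace.go, List.isPrefixOf, ih f (n :: acc) (by simpa using hle)]
      · have : ([o].isPrefixOf (c :: t)) = false := by
          simp [List.isPrefixOf]
          intro h; exact absurd h.symm hc
        simp [PySem.Chars.replace.go, this, hc, ih f (c :: acc) (by simpa using hle)]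

theorem replace_comma (l : List Char) :
    PySem.Chars.replace l [','] [' '] = l.map pvRep := by
  have h := replace_go_single ',' ' ' l l.length [] le_rfl
  simpa [PySem.Chars.replace, pvRep] using h

theorem tok_eq : ∀ (l : List Char) (flag : List Char),
    (∀ c ∈ l, pvDomChar c = true) → (',' ∉ flag) →
    pvTokA l flag = pvTokS (l.map pvRep) flag.reverse := by
  intro l
  induction l with
  | nil =>
    intro flag _ _
    by_cases h : flag.isEmpty <;> simp [pvTokA, pvTokS, h]
  | cons c rest ih =>
    intro flag hdom hfl
    have hdc : pvDomChar c = true := hdom c (by simp)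
    have hrest : ∀ d ∈ rest, pvDomChar d = true := fun d hd => hdom d (by simp [hd])
    have hsep := sep_rep c hdc
    by_cases hs : pvSepA c = true
    · have hss : PySem.Chars.isspace (pvRep c) = true := hsep.trans hs
      by_cases h : flag.isEmpty
      · have hf : flag = [] := by simpa using h
        subst hf
        simpa [pvTokA, pvTokS, hs, hss] using ih [] hrest (by simp)
      · simpa [pvTokA, pvTokS, hs, hss, h] using ih [] hrest (by simp)
    · have hs' : pvSepA c = false := by simpa using hs
      have hss : PySem.Chars.isspace (pvRep c) = false := hsep.trans hs'
      have hcc : c ≠ ',' := by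
        intro hc; subst hc; exact hs (by decide)
      have hrep : pvRep c = c := by simp [pvRep, hcc]
      have h2 := ih (flag ++ [c]) hrest (by
        intro hmem
        rcases List.mem_append.mp hmem with h1 | h1
        · exact hfl h1
        · simp at h1; exact hcc h1.symm)
      have hss2 : PySem.Chars.isspace c = false := by rw [← hrep]; exact hss
      simp only [pvTokA, pvTokS, List.map_cons, hrep, hss2, hs', Bool.false_eq_true, if_false]
      rw [h2]
      simp

theorem pvRunA_spec : ∀ (cs : List Char) (k : Nat),
    pvRunA cs k = k + ((cs.drop k).takeWhile PySem.Chars.isdigit).length := by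
  intro cs k
  fun_induction pvRunA cs k with
  | case1 k h hd ih =>
    rw [ih, List.drop_eq_getElem_cons h, List.takeWhile_cons_of_pos hd]
    simp; omega
  | case2 k h hd =>
    rw [List.drop_eq_getElem_cons h, List.takeWhile_cons_of_neg (by simpa using hd)]
    simp
  | case3 k h =>
    rw [List.drop_eq_nil_iff.mpr (by omega)]
    simp

theorem pvGoodA_true (cs : List Char) (k : Nat) : pvGoodA cs k true = true := by
  have main : ∀ (m k : Nat), cs.length - k ≤ m → pvGoodA cs k true = true := by
    intro m
    induction m with
    | zero =>
      intro k h
      rw [pvGoodA, dif_neg (by omega)]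
    | succ m ih =>
      intro k h
      rw [pvGoodA]
      by_cases hk : k < cs.length
      · rw [dif_pos hk]
        by_cases hd : PySem.Chars.isdigit cs[k]
        · rw [if_pos hd]; exact ih (k + 1) (by omega)
        · rw [if_neg hd]
      · rw [dif_neg hk]
  exact main cs.length k (by omega)

theorem pvGoodA_spec (cs : List Char) (k : Nat) :
    pvGoodA cs k false = ((cs.drop k).head?.elim false PySem.Chars.isdigit) := by
  rw [pvGoodA]
  by_cases h : k < cs.length
  · rw [List.drop_eq_getElem_cons h]
    by_cases hd : PySem.Chars.isdigit cs[k]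
    · simp [h, hd, pvGoodA_true]
    · simp [h, hd]
  · rw [List.drop_eq_nil_iff.mpr (by omega)]
    simp [h]
theorem head?_dropWhile {p : Char → Bool} : ∀ (l : List Char) (c : Char),
    (l.dropWhile p).head? = some c → p c = false := by
  intro l
  induction l with
  | nil => intro c h; simp at h
  | cons a t ih =>
    intro c h
    by_cases ha : p a
    · exact ih c (by simpa [List.dropWhile_cons, ha] using h)
    · have : a = c := by simpa [List.dropWhile_cons, ha] using h
      subst this
      simpa using ha

theorem partDots_digits : ∀ (ds l : List Char), (∀ c ∈ ds, PySem.Chars.isdigit c = true) →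
    pvPartDots (ds ++ l) = (ds ++ (pvPartDots l).1, (pvPartDots l).2) := by
  intro ds
  induction ds with
  | nil => intro l _; simp
  | cons d t ih =>
    intro l hd
    have hdd : PySem.Chars.isdigit d = true := hd d (by simp)
    have hne : d ≠ '.' := by
      intro h; subst h; exact absurd hdd (by decide)
    have hcond : ¬(d = '.' ∧ (t ++ l).head? = some '.') := fun h => hne h.1
    show (if d = '.' ∧ (t ++ l).head? = some '.' then ([], some (t ++ l).tail)
      else ((d :: (pvPartDots (t ++ l)).1, (pvPartDots (t ++ l)).2) : List Char × Option (List Char)))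
      = (d :: t ++ (pvPartDots l).1, (pvPartDots l).2)
    rw [if_neg hcond, ih l (fun c hc => hd c (by simp [hc]))]
    simp

theorem take_one_eq_dot (t : List Char) : (t.take 1 = ['.']) ↔ t.head? = some '.' := by
  cases t <;> simp

theorem prfpAB (p : String) : pvParseRangeA p = pvParseRangeB p := by
  have hds : ∀ c ∈ p.toList.takeWhile PySem.Chars.isdigit, PySem.Chars.isdigit c = true :=
    fun c hc => List.mem_takeWhile_imp hc
  simp only [pvParseRangeA, pvParseRangeB]
  set L := p.toList with hL
  set A := L.takeWhile PySem.Chars.isdigit with hA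
  set B := L.dropWhile PySem.Chars.isdigit with hB
  have hsplit : A ++ B = L := List.takeWhile_append_dropWhile
  have hdl : L.drop A.length = B := by rw [← hsplit]; exact List.drop_left
  have hrun : pvRunA L 0 = A.length := by
    have := pvRunA_spec L 0
    simpa [← hA] using this
  have hslice : PySem.List.slice L (some ((A.length : Nat) : Int)) (some (((A.length : Nat) : Int) + 2))
      = B.take 2 := by
    have h2 : (((A.length : Nat) : Int) + 2) = (((A.length + 2 : Nat)) : Int) := by push_cast; ring
    rw [h2, PySem.List.slice_natCast, Nat.add_sub_cancel_left, hdl]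
  have hgood : pvGoodA L (A.length + 2) false = ((B.drop 2).head?.elim false PySem.Chars.isdigit) := by
    rw [pvGoodA_spec, ← hdl, List.drop_drop]
  have hpart : pvPartDots L = (A ++ (pvPartDots B).1, (pvPartDots B).2) := by
    rw [← hsplit]; exact partDots_digits A B hds
  rw [hrun, hslice, hgood, hpart]
  cases hBc : B with
  | nil => simp [pvPartDots]
  | cons c t =>
    have hc : PySem.Chars.isdigit c = false := head?_dropWhile L c (by rw [← hB, hBc]; rfl)
    by_cases hdots : c = '.' ∧ t.head? = some '.'
    · obtain ⟨hc1, hc2⟩ := hdots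
      subst hc1
      obtain ⟨t', rfl⟩ : ∃ t', t = '.' :: t' := by
        cases t with
        | nil => simp at hc2
        | cons a t' => exact ⟨t', by simpa using by rw [(by simpa using hc2 : a = '.')]⟩
      have hp : pvPartDots ('.' :: '.' :: t') = ([], some t') := by
        simp [pvPartDots]
      rw [hp]
      have hall : A.all PySem.Chars.isdigit = true := List.all_eq_true.mpr hds
      by_cases hA0 : A.isEmpty
      · have : A.length = 0 := by simpa [List.isEmpty_iff, List.length_eq_zero_iff] using hA0
        simp [this, PySem.Chars.strIsdigit, hA0]
      · have h0 : 0 < A.length := List.length_pos_iff.mpr (by simpa using hA0)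
        have hAe : A.isEmpty = false := by
          cases hAx : A with
          | nil => exact absurd hAx (by simpa using hA0)
          | cons a s => rfl
        have hsd : PySem.Chars.strIsdigit (A ++ []) = true := by
          simp [PySem.Chars.strIsdigit, hall, hAe]
        rw [hsd]
        cases t' with
        | nil => simp [h0, PySem.Chars.strIsdigit]
        | cons d t'' => simp [h0, PySem.Chars.strIsdigit]
    · have hcond : ¬(0 < A.length ∧ (c :: t).take 2 = ['.', '.']) := by
        rintro ⟨-, htake⟩
        apply hdots
        have : c = '.' ∧ t.take 1 = ['.'] := by
          cases t with
          | nil => simp at htake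
          | cons a s => simpa using htake
        exact ⟨this.1, (take_one_eq_dot t).mp this.2⟩
      rw [if_neg hcond]
      have hp : pvPartDots (c :: t) = (c :: (pvPartDots t).1, (pvPartDots t).2) := by
        by_cases hd2 : c = '.' ∧ t.head? = some '.'
        · exact absurd hd2 hdots
        · show (if c = '.' ∧ t.head? = some '.' then _ else _) = _
          rw [if_neg hd2]
      rw [hp]
      cases hY : (pvPartDots t).2 with
      | none => rfl
      | some rest =>
        have : PySem.Chars.strIsdigit (A ++ c :: (pvPartDots t).1) = false := by
          simp [PySem.Chars.strIsdigit, hc]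
        simp [this]

theorem prfpB_some (t q : String) (h : pvParseRangeB t = some q) : q = t := by
  simp only [pvParseRangeB] at h
  cases hY : (pvPartDots t.toList).2 with
  | none =>
    rw [hY] at h
    dsimp only at h
    simp at h
  | some rest =>
    rw [hY] at h
    dsimp only at h
    by_cases hc : (PySem.Chars.strIsdigit (pvPartDots t.toList).1
        && PySem.Chars.strIsdigit (rest.take 1)) = true
    · rw [if_pos hc] at h; exact (Option.some_inj.mp h).symm
    · rw [if_neg hc] at h; simp at h

theorem step_eq (fs : List String) (t : String) : pvStepA fs t = pvStepB fs t := by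
  unfold pvStepA pvStepB
  rw [prfpAB]
  cases h : pvParseRangeB t with
  | none => simp
  | some q =>
    have hq : q = t := prfpB_some t q h
    subst hq
    by_cases h1 : (0 < fs.length ∧ PySem.List.pyGet? fs (-1) = some "range:")
    · by_cases h2 : q = ""
      · simp [h1, h2]
      · simp [h1, h2]
    · simp [h1]

theorem foldl_ofList (ts : List String) : ∀ (fs : List String),
    ((ts.map String.toList).foldl (fun a t => pvStepA a (String.ofList t)) fs) = ts.foldl pvStepB fs := by
  induction ts with
  | nil => intro fs; rfl
  | cons t ts ih =>
    intro fs
    rw [List.map_cons, List.foldl_cons, String.ofList_toList, step_eq]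
    exact ih _

theorem main_eq (s : String) (hdom : Dom_parse_flag_comment_py s) :
    parse_flag_comment_py s = parse_flag_comment_py_alt s := by
  unfold parse_flag_comment_py parse_flag_comment_py_alt
  have hdomc : ∀ c ∈ s.toList, pvDomChar c = true :=
    List.all_eq_true.mp hdom
  rw [pvLoopA_eq s.toList [] [] (fun _ => rfl),
      tok_eq s.toList [] hdomc (by simp)]
  have h1 : (",".toList : List Char) = [','] := by decide
  have h2 : (" ".toList : List Char) = [' '] := by decide
  have hrepl : (PySem.Str.replace s "," " ").toList = s.toList.map pvRep := by
    rw [PySem.Str.toList_replace, h1, h2, replace_comma]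
  have hsplit : PySem.Chars.split₀ ((PySem.Str.replace s "," " ").toList)
      = pvTokS (s.toList.map pvRep) [] := by
    rw [hrepl, split₀_tokS]
  rw [List.reverse_nil, ← hsplit, ← PySem.Str.split₀_map_toList]
  exact foldl_ofList _ []

-- ===== VERDICT (by name: the statement is the Claim_ definition above) =====
theorem parse_flag_comment_py_spec : Claim_equal_parse_flag_comment_py := by
  intro flag_comment hdom
  unfold Spec_parse_flag_comment_py
  exact main_eq flag_comment hdom
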